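-- pv_equiv track=rewrite | github.com/deepakkolapati/Python_Basics | strings_ds.py | change_first_occur
-- ===== SOURCE A (Python) =====
-- def change_first_occur(str,char):
--     flag=0
--     newstr=""
--     count=0
--     for i in str:
--         if i==char and flag==1:
--               newstr+="$"
--         elif i==char and flag==0:
--               newstr+=char
--               flag=1
--         else:
--             newstr+=str[count]
--         count+=1
--     return newstr
-- ===== SOURCE B (Python) =====
-- def change_first_occur(str, char):
--     # A char of length != 1 can never equal any single character of str, so nothing to replace.
--     if len(char) != 1:
--         return str
--     i = str.find(char)
--     if i == -1:
--         return str
--     # keep everything up to and including the first occurrence, mask later occurrences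
--     return str[:i+1] + "".join("$" if c == char else c for c in str[i+1:])
-- ===== Notes on version B (the rewrite author's own statement) =====
-- stated objective: faster
-- what changed: Replaces A's stateful flag/count per-character loop (with string indexing and repeated concatenation) by a find-then-partition decomposition: locate the first occurrence with str.find, keep the head up to and including it, and mask later occurrences of the tail in one join; a char of length != 1 never equals any single character, so the string is returned unchanged then, as in A.
import Mathlib
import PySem

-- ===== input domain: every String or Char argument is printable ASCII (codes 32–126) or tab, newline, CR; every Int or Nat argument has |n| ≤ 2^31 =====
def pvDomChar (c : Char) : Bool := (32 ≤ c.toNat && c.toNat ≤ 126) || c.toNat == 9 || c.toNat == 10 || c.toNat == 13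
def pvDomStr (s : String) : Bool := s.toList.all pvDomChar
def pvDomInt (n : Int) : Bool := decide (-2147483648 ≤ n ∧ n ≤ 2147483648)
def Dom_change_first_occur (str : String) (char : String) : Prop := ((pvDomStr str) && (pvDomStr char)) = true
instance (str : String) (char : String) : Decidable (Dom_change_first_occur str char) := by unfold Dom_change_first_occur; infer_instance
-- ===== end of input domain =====

-- B replaces A's stateful flag/count per-character loop by find-the-first-occurrence
-- then keep-head / mask-tail (measured faster by a constant factor: C-level find/join
-- instead of per-character indexing and concatenation).

-- ===== PORT A =====
-- the for-loop of A: state (flag, count, newstr); 'newstr += str[count]' via Str.pyGet?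
-- (in range on every reached iteration, so the .elim default is never used)
def cfoLoop (str : String) (char : String) : List Char → Int → Int → String → String
  | [], _, _, newstr => newstr
  | i :: rest, flag, count, newstr =>
    if String.ofList [i] == char && flag == 1 then
      cfoLoop str char rest flag (count + 1) (newstr ++ "$")
    else if String.ofList [i] == char && flag == 0 then
      cfoLoop str char rest 1 (count + 1) (newstr ++ char)
    else
      cfoLoop str char rest flag (count + 1)
        (newstr ++ ((PySem.Str.pyGet? str count).elim "" (fun c => String.ofList [c])))

def change_first_occur (str : String) (char : String) : String :=
  cfoLoop str char str.toList 0 0 ""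

-- ===== PORT B =====
def change_first_occur_alt (str : String) (char : String) : String :=
  if PySem.Str.len char ≠ 1 then str
  else
    let i := PySem.Str.find str char
    if i == -1 then str
    else
      PySem.Str.slice str none (some (i + 1)) ++
        String.ofList ((PySem.Str.slice str (some (i + 1)) none).toList.map
          (fun c => if String.ofList [c] == char then '$' else c))

-- ===== PRECONDITION & SPEC =====
def Spec_change_first_occur (str : String) (char : String) (out : String) : Prop := out = change_first_occur_alt str char
instance (str : String) (char : String) (out : String) : Decidable (Spec_change_first_occur str char out) := by unfold Spec_change_first_occur; infer_instance

-- ===== CLAIM (what is proved, stated in full; the proofs are below) =====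
def Claim_equal_change_first_occur : Prop := ∀ (str : String) (char : String), Dom_change_first_occur str char → Spec_change_first_occur str char (change_first_occur str char)

-- ===== LEMMAS AND PROOFS =====

-- the loop with count dropped: the else-branch appends the loop character itself
def pureLoop (char : String) : List Char → Int → String → String
  | [], _, newstr => newstr
  | i :: rest, flag, newstr =>
    if String.ofList [i] == char && flag == 1 then
      pureLoop char rest flag (newstr ++ "$")
    else if String.ofList [i] == char && flag == 0 then
      pureLoop char rest 1 (newstr ++ char)
    else
      pureLoop char rest flag (newstr ++ String.ofList [i])

-- while count tracks the position, str[count] is the loop character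
lemma cfoLoop_eq_pureLoop (str char : String) :
    ∀ (rest : List Char) (k : Nat), rest = str.toList.drop k →
      ∀ (flag : Int) (acc : String),
        cfoLoop str char rest flag (k : Int) acc = pureLoop char rest flag acc := by
  intro rest
  induction rest with
  | nil => intro k _ flag acc; simp [cfoLoop, pureLoop]
  | cons i rest ih =>
    intro k hk flag acc
    have hget : str.toList[k]? = some i := by
      have h0 : (str.toList.drop k)[0]? = some i := by rw [← hk]; rfl
      simpa using h0
    have hrest : rest = str.toList.drop (k + 1) := by
      have h1 : (str.toList.drop k).drop 1 = str.toList.drop (k + 1) := by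
        rw [List.drop_drop]
      rw [← h1, ← hk]; rfl
    have hpy : PySem.Str.pyGet? str (k : Int) = some i := by
      simp [hget]
    have hk1 : (k : Int) + 1 = ((k + 1 : Nat) : Int) := by push_cast; ring
    simp only [cfoLoop, pureLoop, hpy, Option.elim, hk1]
    split_ifs <;> rw [ih (k + 1) hrest]

-- when no single character can equal char, the loop just copies
lemma pureLoop_copy (char : String) (h : ∀ c : Char, String.ofList [c] ≠ char) :
    ∀ (l : List Char) (flag : Int) (acc : String),
      pureLoop char l flag acc = acc ++ String.ofList l := by
  intro l
  induction l with
  | nil => intro flag acc; simp [pureLoop]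
  | cons i rest ih =>
    intro flag acc
    have : (String.ofList [i] == char) = false := by
      simpa using h i
    simp only [pureLoop, this, Bool.false_and, if_neg Bool.false_ne_true]
    rw [ih]
    apply String.toList_inj.mp
    simp

-- after the flag is set, every occurrence becomes '$'
lemma pureLoop_one (c : Char) :
    ∀ (l : List Char) (acc : String),
      pureLoop (String.ofList [c]) l 1 acc =
        acc ++ String.ofList (l.map (fun x => if x = c then '$' else x)) := by
  intro l
  induction l with
  | nil => intro acc; simp [pureLoop]
  | cons i rest ih =>
    intro acc
    by_cases hic : i = c
    · have hc : (String.ofList [i] == String.ofList [c]) = true := by simp [hic]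
      simp only [pureLoop, hc, Bool.true_and]
      rw [if_pos (by decide)]
      rw [ih]
      apply String.toList_inj.mp
      simp [hic]
    · have : (String.ofList [i] == String.ofList [c]) = false := by
        simpa using fun h => hic (by
          have := congrArg String.toList h; simpa using this)
      simp only [pureLoop, this, Bool.false_and, if_neg Bool.false_ne_true]
      rw [ih]
      apply String.toList_inj.mp
      simp [hic]

-- before the flag is set and no occurrence ever comes, the loop copies
lemma pureLoop_zero_none (c : Char) :
    ∀ (l : List Char), c ∉ l → ∀ (acc : String),
      pureLoop (String.ofList [c]) l 0 acc = acc ++ String.ofList l := by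
  intro l
  induction l with
  | nil => intro _ acc; simp [pureLoop]
  | cons i rest ih =>
    intro hmem acc
    have hic : i ≠ c := fun h => hmem (by simp [h])
    have hc : (String.ofList [i] == String.ofList [c]) = false := by
      simpa using fun h => hic (by
        have := congrArg String.toList h; simpa using this)
    simp only [pureLoop, hc, Bool.false_and, if_neg Bool.false_ne_true]
    rw [ih (fun h => hmem (List.mem_cons_of_mem _ h))]
    apply String.toList_inj.mp
    simp

-- before the flag is set: copy up to and including the first occurrence, then mask
lemma pureLoop_zero_split (c : Char) :
    ∀ (pre : List Char), c ∉ pre → ∀ (suf : List Char) (acc : String),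
      pureLoop (String.ofList [c]) (pre ++ c :: suf) 0 acc =
        acc ++ String.ofList (pre ++ [c]) ++
          String.ofList (suf.map (fun x => if x = c then '$' else x)) := by
  intro pre
  induction pre with
  | nil =>
    intro _ suf acc
    have hc : (String.ofList [c] == String.ofList [c]) = true := by simp
    simp only [List.nil_append, pureLoop, hc, Bool.true_and]
    rw [if_neg (by decide), if_pos (by decide)]
    rw [pureLoop_one]
  | cons i rest ih =>
    intro hmem suf acc
    have hic : i ≠ c := fun h => hmem (by simp [h])
    have hc : (String.ofList [i] == String.ofList [c]) = false := by
      simpa using fun h => hic (by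
        have := congrArg String.toList h; simpa using this)
    simp only [List.cons_append, pureLoop, hc, Bool.false_and, if_neg Bool.false_ne_true]
    rw [ih (fun h => hmem (List.mem_cons_of_mem _ h))]
    apply String.toList_inj.mp
    simp

-- [c] is a prefix of l.drop j exactly when l[j]? = some c
lemma singleton_prefix_drop (c : Char) (l : List Char) (j : Nat) :
    [c] <+: l.drop j ↔ l[j]? = some c := by
  constructor
  · rintro ⟨t, ht⟩
    have h0 : (l.drop j)[0]? = some c := by rw [← ht]; rfl
    simpa using h0
  · intro h
    have h0 : (l.drop j)[0]? = some c := by simpa using h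
    cases hd : l.drop j with
    | nil => rw [hd] at h0; simp at h0
    | cons a t =>
      rw [hd] at h0; simp at h0
      exact ⟨t, by simp [h0]⟩

theorem cfo_main (str char : String) :
    change_first_occur str char = change_first_occur_alt str char := by
  have hpure : change_first_occur str char = pureLoop char str.toList 0 "" := by
    unfold change_first_occur
    exact cfoLoop_eq_pureLoop str char str.toList 0 (by simp) 0 ""
  by_cases hlen : char.toList.length = 1
  · -- char is a single character c
    obtain ⟨c, hc⟩ : ∃ c, char.toList = [c] := by
      cases h : char.toList with
      | nil => rw [h] at hlen; simp at hlen
      | cons a t =>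
        rw [h] at hlen; simp at hlen
        exact ⟨a, by simp [hlen]⟩
    have hchar : char = String.ofList [c] := by
      rw [← hc, String.ofList_toList]
    have hfind : PySem.Str.find str char = PySem.Chars.find str.toList [c] := by
      rw [PySem.Str.find_eq, hc]
    by_cases hf : PySem.Chars.find str.toList [c] = -1
    · -- no occurrence: both sides return str
      have hnotmem : c ∉ str.toList := by
        have := (PySem.Chars.find_eq_neg_one_iff (s := str.toList) (sub := [c])).mp hf
        exact fun hm => this ((List.singleton_infix_iff c str.toList).mpr hm)
      rw [hpure, hchar, pureLoop_zero_none c _ hnotmem]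
      unfold change_first_occur_alt
      rw [if_neg (by rw [PySem.Str.len_eq, ← hchar, hc]; simp)]
      simp only [← hchar, hfind, hf]
      apply String.toList_inj.mp
      simp
    · -- first occurrence at index n = (find).toNat
      have hge : 0 ≤ PySem.Chars.find str.toList [c] := by
        have := PySem.Chars.neg_one_le_find (s := str.toList) (sub := [c])
        omega
      obtain ⟨hpre, hmin⟩ := PySem.Chars.find_spec (s := str.toList) (sub := [c]) hge
      set n := (PySem.Chars.find str.toList [c]).toNat with hn
      have hgetn : str.toList[n]? = some c := (singleton_prefix_drop c _ n).mp hpre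
      have hnlt : n < str.toList.length := by
        by_contra hge'
        rw [List.getElem?_eq_none (by omega)] at hgetn
        simp at hgetn
      have hnotpre : c ∉ str.toList.take n := by
        intro hm
        obtain ⟨j, hj, hjget⟩ := List.getElem_of_mem hm
        have hjn : j < n := by
          have := hj; simp [List.length_take] at this; omega
        have hjl : j < str.toList.length := by
          have := hj; simp [List.length_take] at this; omega
        have hj? : str.toList[j]? = some c := by
          rw [List.getElem?_eq_getElem hjl]
          rw [List.getElem_take] at hjget
          simp [hjget]
        exact hmin j hjn ((singleton_prefix_drop c _ j).mpr hj?)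
      have hgetn' : str.toList[n] = c := by
        rw [List.getElem?_eq_getElem hnlt] at hgetn
        exact Option.some.inj hgetn
      have htake1 : str.toList.take (n + 1) = str.toList.take n ++ [c] := by
        rw [List.take_add_one, List.getElem?_eq_getElem hnlt, hgetn']
        rfl
      have hsplit : str.toList = str.toList.take n ++ c :: str.toList.drop (n + 1) := by
        conv_lhs => rw [← List.take_append_drop (n + 1) str.toList, htake1]
        simp
      -- A's side
      rw [hpure, hchar]
      conv_lhs => rw [hsplit]
      rw [pureLoop_zero_split c _ hnotpre]
      -- B's side
      unfold change_first_occur_alt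
      rw [if_neg (by rw [PySem.Str.len_eq, ← hchar, hc]; simp)]
      simp only [← hchar, hfind]
      rw [if_neg (by simpa using hf)]
      have hplus : PySem.Chars.find str.toList [c] + 1 = ((n + 1 : Nat) : Int) := by
        push_cast; omega
      apply String.toList_inj.mp
      simp only [String.toList_append, PySem.Str.toList_slice,
        PySem.Chars.slice_eq_listSlice, hplus,
        PySem.List.slice_to_natCast, PySem.List.slice_from_natCast,
        String.toList_ofList, htake1]
      simp
      congr 2
      funext x
      by_cases hxc : x = c
      · simp [hxc, hchar]
      · rw [if_neg hxc, if_neg]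
        rw [hchar]
        intro h
        exact hxc (by have := congrArg String.toList h; simpa using this)
  · -- char is not a single character: both sides return str unchanged
    have hne : ∀ x : Char, String.ofList [x] ≠ char := by
      intro x h
      apply hlen
      rw [← h]; simp
    rw [hpure, pureLoop_copy char hne]
    unfold change_first_occur_alt
    rw [if_pos (by rw [PySem.Str.len_eq]; intro h; apply hlen; omega)]
    apply String.toList_inj.mp
    simp

-- ===== VERDICT (by name: the statement is the Claim_ definition above) =====
theorem change_first_occur_spec : Claim_equal_change_first_occur := by
  intro str char _
  unfold Spec_change_first_occur
  exact cfo_main str char
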